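-- pv_equiv track=rewrite | github.com/abhatkar1/Hello-World | Ch11_10.py | findMaxRows
-- ===== SOURCE A (Python) =====
-- def findMaxRows(A):
--     listOfMaxRows = ""
--     sumOfMaxRow = sum(A[0])
--
--     for i in range(1, len(A)):
--         if sumOfMaxRow < sum(A[i]):
--             sumOfMaxRow = sum(A[i])
--     for i in range(len(A)):
--         if sumOfMaxRow == sum(A[i]):
--             listOfMaxRows += str(i) + ", "
--     return listOfMaxRows.strip(', ')
-- ===== SOURCE B (Python) =====
-- def findMaxRows(A):
--     best = sum(A[0])
--     idxs = [0]
--     for i in range(1, len(A)):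
--         s = sum(A[i])
--         if s > best:
--             best = s
--             idxs = [i]
--         elif s == best:
--             idxs.append(i)
--     return ", ".join(map(str, idxs))
-- ===== Notes on version B (the rewrite author's own statement) =====
-- stated objective: alternative
-- what changed: One single pass maintaining (current best sum, list of argmax indices) that resets the index list on a new maximum and appends on ties, instead of A's two staged scans (first find the max, then rescan all rows collecting matches) with string concatenation and strip.
import Mathlib
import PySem

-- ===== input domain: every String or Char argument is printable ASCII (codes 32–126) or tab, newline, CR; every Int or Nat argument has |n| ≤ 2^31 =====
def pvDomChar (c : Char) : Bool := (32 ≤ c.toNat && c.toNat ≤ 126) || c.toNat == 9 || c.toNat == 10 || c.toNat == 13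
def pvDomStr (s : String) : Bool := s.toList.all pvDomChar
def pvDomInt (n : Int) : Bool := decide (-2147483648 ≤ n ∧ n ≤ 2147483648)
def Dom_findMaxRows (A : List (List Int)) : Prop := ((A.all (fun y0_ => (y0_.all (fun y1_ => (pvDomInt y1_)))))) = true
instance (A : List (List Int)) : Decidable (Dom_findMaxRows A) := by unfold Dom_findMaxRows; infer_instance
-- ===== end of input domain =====

-- B is a single pass keeping (current best sum, list of argmax indices), resetting on a new
-- maximum and appending on ties, instead of A's two staged scans (find max, then rescan).

-- ===== PORT A =====
-- literal port of A; strings are handled on the List Char side (PySem.Chars), packed at the end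
def findMaxRows (A : List (List Int)) : String :=
  match PySem.List.pyGet? A 0 with
  | none => ""   -- Python raises IndexError on sum(A[0]) here; excluded by Pre_findMaxRows
  | some r0 =>
    -- sumOfMaxRow = sum(A[0]); for i in range(1, len(A)): if sumOfMaxRow < sum(A[i]): ...
    let m := (PySem.List.pyRange 1 (PySem.List.len A)).foldl
      (fun acc i => if acc < (PySem.List.pyGetD A i []).sum then (PySem.List.pyGetD A i []).sum else acc)
      r0.sum
    -- for i in range(len(A)): if sumOfMaxRow == sum(A[i]): listOfMaxRows += str(i) + ", "
    let s := (PySem.List.pyRange 0 (PySem.List.len A)).foldl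
      (fun acc i => if m == (PySem.List.pyGetD A i []).sum then acc ++ PySem.Int.toChars i ++ [',', ' '] else acc)
      ([] : List Char)
    -- return listOfMaxRows.strip(', ')
    String.mk (PySem.Chars.stripChars s [',', ' '])

-- ===== PORT B =====
-- best = sum(A[0]); idxs = [0]; one pass over range(1, len(A)) updating (best, idxs); join at the end
def findMaxRows_alt (A : List (List Int)) : String :=
  match PySem.List.pyGet? A 0 with
  | none => ""   -- Python raises IndexError on sum(A[0]) here; excluded by Pre_findMaxRows
  | some r0 =>
    let st := (PySem.List.pyRange 1 (PySem.List.len A)).foldl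
      (fun st i =>
        if st.1 < (PySem.List.pyGetD A i []).sum then ((PySem.List.pyGetD A i []).sum, [i])
        else if (PySem.List.pyGetD A i []).sum == st.1 then (st.1, st.2 ++ [i])
        else st)
      (r0.sum, ([0] : List Int))
    String.mk (PySem.Chars.join [',', ' '] (st.2.map PySem.Int.toChars))

-- ===== PRECONDITION & SPEC =====
-- Pre_ excludes only the empty list, on which A raises IndexError (and B too).
def Pre_findMaxRows (A : List (List Int)) : Prop := A ≠ []
instance (A : List (List Int)) : Decidable (Pre_findMaxRows A) := by unfold Pre_findMaxRows; infer_instance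
def pvWitness_findMaxRows : List (List Int) := [[1], [2, 0], [0, 2]]

def Spec_findMaxRows (A : List (List Int)) (out : String) : Prop := out = findMaxRows_alt A
instance (A : List (List Int)) (out : String) : Decidable (Spec_findMaxRows A out) := by unfold Spec_findMaxRows; infer_instance

-- ===== CLAIM (what is proved, stated in full; the proofs are below) =====
def Claim_equal_findMaxRows : Prop := ∀ (A : List (List Int)), Dom_findMaxRows A → Pre_findMaxRows A → Spec_findMaxRows A (findMaxRows A)

-- ===== LEMMAS AND PROOFS =====

-- Nat.toDigitsCore returns [] only when it got [] and fuel 0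
theorem pv_tdc_ne (b : Nat) (fuel n : Nat) (ds : List Char) (hf : 0 < fuel) :
    Nat.toDigitsCore b fuel n ds ≠ [] := by
  induction fuel generalizing n ds with
  | zero => omega
  | succ fuel ih =>
    simp only [Nat.toDigitsCore]
    split
    · simp
    · rcases Nat.eq_zero_or_pos fuel with rfl | hpos
      · simp [Nat.toDigitsCore]
      · exact ih _ _ hpos

theorem pv_tdc_mem (b : Nat) (fuel : Nat) : ∀ (n : Nat) (ds : List Char) (c : Char),
    c ∈ Nat.toDigitsCore b fuel n ds → c ∈ ds ∨ ∃ m, c = Nat.digitChar m := by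
  induction fuel with
  | zero => intro n ds c h; exact Or.inl h
  | succ fuel ih =>
    intro n ds c
    simp only [Nat.toDigitsCore]
    split
    · intro h
      rcases List.mem_cons.mp h with h | h
      · exact Or.inr ⟨n % b, h⟩
      · exact Or.inl h
    · intro h
      rcases ih _ _ _ h with h' | h'
      · rcases List.mem_cons.mp h' with h'' | h''
        · exact Or.inr ⟨n % b, h''⟩
        · exact Or.inl h''
      · exact Or.inr h'

theorem pv_digitChar_ok (m : Nat) : ([',', ' '].contains (Nat.digitChar m)) = false := by
  by_cases h : m < 16
  · interval_cases m <;> decide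
  · have h' : Nat.digitChar m = '*' := by
      unfold Nat.digitChar
      repeat rw [if_neg (by omega)]
    rw [h']
    decide

theorem pv_toChars_ne (i : Int) : PySem.Int.toChars i ≠ [] := by
  unfold PySem.Int.toChars
  split
  · simp
  · exact pv_tdc_ne 10 _ _ [] (by omega)

theorem pv_toChars_ok (i : Int) : ∀ c ∈ PySem.Int.toChars i, ([',', ' '].contains c) = false := by
  intro c hc
  unfold PySem.Int.toChars at hc
  have hd : ∀ n : Nat, c ∈ Nat.toDigits 10 n → ([',', ' '].contains c) = false := by
    intro n hn
    rcases pv_tdc_mem 10 (n + 1) n [] c hn with h | ⟨m, rfl⟩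
    · simp at h
    · exact pv_digitChar_ok m
  split at hc
  · rcases List.mem_cons.mp hc with h | h
    · subst h; decide
    · exact hd _ h
  · exact hd _ hc

-- running max written with `if acc < x` is foldl max
theorem pv_foldl_if_max (g : Int → Int) : ∀ (l : List Int) (a : Int),
    l.foldl (fun acc i => if acc < g i then g i else acc) a = l.foldl (fun acc i => max acc (g i)) a
  | [], _ => rfl
  | x :: t, a => by
    simp only [List.foldl_cons]
    rw [pv_foldl_if_max g t]
    congr 1
    rcases lt_or_ge a (g x) with h | h
    · simp [h, max_eq_right h.le]
    · simp [not_lt.mpr h, max_eq_left h]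

-- the base value never exceeds the running maximum
theorem pv_le_foldl_maxg (g : Int → Int) : ∀ (l : List Int) (M : Int),
    M ≤ l.foldl (fun acc i => max acc (g i)) M
  | [], _ => le_refl _
  | x :: t, M =>
    le_trans (le_max_left M (g x)) (pv_le_foldl_maxg g t (max M (g x)))

-- B's single pass characterised: it computes the running max and the indices attaining it,
-- where the accumulated index list F survives only if the base M is still maximal
theorem pv_single_pass (g : Int → Int) : ∀ (l : List Int) (M N : Int) (F : List Int),
    N = l.foldl (fun acc i => max acc (g i)) M →
    l.foldl
      (fun st i =>
        if st.1 < g i then (g i, [i])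
        else if g i == st.1 then (st.1, st.2 ++ [i])
        else st)
      (M, F)
    = (N, (if M < N then [] else F) ++ l.filter (fun i => g i == N)) := by
  intro l
  induction l with
  | nil =>
    intro M N F hN
    simp only [List.foldl_nil] at hN
    subst hN
    simp
  | cons x rest ih =>
    intro M N F hN
    simp only [List.foldl_cons] at hN ⊢
    have hle : max M (g x) ≤ N := hN ▸ pv_le_foldl_maxg g rest (max M (g x))
    by_cases h1 : M < g x
    · rw [if_pos h1]
      have hmax : max M (g x) = g x := max_eq_right h1.le
      rw [hmax] at hN hle
      rw [ih (g x) N [x] hN, List.filter_cons]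
      have hMN : M < N := lt_of_lt_of_le h1 hle
      rcases eq_or_lt_of_le hle with heq | hlt
      · simp [heq, hMN]
      · simp [hMN, hlt, Int.ne_of_lt hlt]
    · rw [if_neg h1]
      have hmax : max M (g x) = M := max_eq_left (not_lt.mp h1)
      rw [hmax] at hN hle
      by_cases h2 : g x = M
      · rw [if_pos (by simp [h2])]
        rw [ih M N (F ++ [x]) hN, List.filter_cons]
        rcases eq_or_lt_of_le hle with heq | hlt
        · simp [h2, ← heq]
        · simp [hlt, h2, Int.ne_of_lt hlt]
      · rw [if_neg (by simp [h2])]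
        rw [ih M N F hN, List.filter_cons]
        have hx : g x < M := lt_of_le_of_ne (not_lt.mp h1) h2
        have hne : g x ≠ N := by omega
        simp [hne]

theorem pv_beq_comm (a b : Int) : (a == b) = (b == a) := by
  by_cases h : a = b
  · simp [h]
  · simp [h, Ne.symm h]

-- flatten of pieces each followed by ", " is the ", "-intercalation plus a trailing ", "
theorem pv_flatten_eq_intercalate (sep : List Char) :
    ∀ (ps : List (List Char)), ps ≠ [] →
    ((ps.map (· ++ sep)).flatten) = List.intercalate sep ps ++ sep
  | [], h => absurd rfl h
  | [q], _ => by simp [List.intercalate]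
  | q :: q' :: t, _ => by
    have ih := pv_flatten_eq_intercalate sep (q' :: t) (by simp)
    simp only [List.map_cons, List.flatten_cons] at ih ⊢
    rw [ih]
    have : List.intercalate sep (q :: q' :: t) = q ++ sep ++ List.intercalate sep (q' :: t) := by
      simp [List.intercalate, List.intersperse]
    rw [this]
    simp

theorem pv_intercalate_cons_cons (s a b : List Char) (t : List (List Char)) :
    List.intercalate s (a :: b :: t) = a ++ s ++ List.intercalate s (b :: t) := by
  simp [List.intercalate, List.intersperse]

theorem pv_intercalate_snoc (sep z : List Char) : ∀ (l : List (List Char)), l ≠ [] →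
    List.intercalate sep (l ++ [z]) = List.intercalate sep l ++ sep ++ z := by
  intro l
  induction l with
  | nil => intro h; exact absurd rfl h
  | cons a l ih =>
    intro _
    rcases l with _ | ⟨b, l⟩
    · simp [List.intercalate, List.intersperse]
    · simp only [List.cons_append] at ih ⊢
      rw [pv_intercalate_cons_cons, pv_intercalate_cons_cons, ih (by simp)]
      simp

theorem pv_reverse_intercalate (sep : List Char) : ∀ (ps : List (List Char)),
    (List.intercalate sep ps).reverse = List.intercalate sep.reverse ((ps.map List.reverse).reverse)
  | [] => by simp [List.intercalate]
  | [q] => by simp [List.intercalate]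
  | q :: q' :: t => by
    have ih := pv_reverse_intercalate sep (q' :: t)
    rw [pv_intercalate_cons_cons]
    have h2 : ((q :: q' :: t).map List.reverse).reverse
        = ((q' :: t).map List.reverse).reverse ++ [q.reverse] := by simp
    rw [h2, pv_intercalate_snoc _ _ _ (by simp), ← ih]
    simp

-- stripping the strip-set suffix off `w ++ sep` gives back w when w's ends avoid the set
theorem pv_stripChars_append (w sep chars : List Char)
    (hsep : ∀ c ∈ sep, chars.contains c = true)
    (hh : ∃ c t, w = c :: t ∧ chars.contains c = false)
    (hl : ∃ c t, w.reverse = c :: t ∧ chars.contains c = false) :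
    PySem.Chars.stripChars (w ++ sep) chars = w := by
  obtain ⟨c, t, hw, hc⟩ := hh
  obtain ⟨c', t', hwr, hc'⟩ := hl
  show (List.dropWhile (fun c => chars.contains c)
      (List.dropWhile (fun c => chars.contains c) (w ++ sep)).reverse).reverse = w
  have h1 : List.dropWhile (fun c => chars.contains c) (w ++ sep) = w ++ sep := by
    rw [hw, List.cons_append, List.dropWhile_cons]
    simp only [hc, Bool.false_eq_true, if_false]
  have h2 : List.dropWhile (fun c => chars.contains c) sep.reverse = [] := by
    rw [List.dropWhile_eq_nil_iff]
    intro x hx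
    exact hsep x (List.mem_reverse.mp hx)
  rw [h1, List.reverse_append, List.dropWhile_append, h2]
  simp only [List.isEmpty_nil, if_true]
  rw [hwr, List.dropWhile_cons]
  simp only [hc', Bool.false_eq_true, if_false, ← hwr, List.reverse_reverse]

-- A's second loop with its two appends, as a flatten of a filtered map
theorem pv_foldl_append2_if (p : Int → Bool) (h : Int → List Char) (k : List Char) :
    ∀ (l : List Int) (acc : List Char),
    l.foldl (fun acc i => if p i then acc ++ h i ++ k else acc) acc
      = acc ++ ((l.filter p).map (fun i => h i ++ k)).flatten
  | [], acc => by simp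
  | x :: t, acc => by
    simp only [List.foldl_cons, List.filter_cons]
    rcases hp : p x with _ | _
    · simp only [Bool.false_eq_true, if_false]
      exact pv_foldl_append2_if p h k t acc
    · simp only [if_true, List.map_cons, List.flatten_cons]
      rw [pv_foldl_append2_if p h k t (acc ++ h x ++ k)]
      simp [List.append_assoc]

theorem pv_intercalate_head (sep q : List Char) (qs : List (List Char)) (c : Char) (t : List Char)
    (hq : q = c :: t) : ∃ t', List.intercalate sep (q :: qs) = c :: t' := by
  rcases qs with _ | ⟨b, qs⟩
  · exact ⟨t, by simp [List.intercalate, hq]⟩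
  · rw [pv_intercalate_cons_cons, hq]
    exact ⟨t ++ sep ++ List.intercalate sep (b :: qs), by simp⟩

-- ===== VERDICT (by name: the statement is the Claim_ definition above) =====
theorem findMaxRows_spec : Claim_equal_findMaxRows := by
  intro A _ hA
  unfold Spec_findMaxRows findMaxRows findMaxRows_alt
  rcases A with _ | ⟨a, t⟩
  · exact absurd rfl hA
  have hpos : (0 : Int) < PySem.List.len (a :: t) := by
    simp [PySem.List.len]
  have h0get : PySem.List.pyGet? (a :: t) (0 : Int) = some a := by
    simp [PySem.List.pyGet?, PySem.List.pyIdx?]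
  rw [h0get]
  dsimp only
  -- the index range splits off 0
  have hsplit : PySem.List.pyRange 0 (PySem.List.len (a :: t))
      = 0 :: PySem.List.pyRange 1 (PySem.List.len (a :: t)) := by
    have := PySem.List.pyRange_one_cons (a := 0) (b := PySem.List.len (a :: t)) hpos
    simpa using this
  have hmapA := PySem.List.map_pyGetD_pyRange_zero (a :: t) ([] : List Int)
  rw [hsplit, List.map_cons] at hmapA
  have hg0 : PySem.List.pyGetD (a :: t) 0 [] = a := (List.cons.injEq _ _ _ _ ▸ hmapA).1
  have hgtail : (PySem.List.pyRange 1 (PySem.List.len (a :: t))).map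
      (fun j => PySem.List.pyGetD (a :: t) j []) = t := (List.cons.injEq _ _ _ _ ▸ hmapA).2
  -- the common maximum M
  have hmaxfold : (PySem.List.pyRange 1 (PySem.List.len (a :: t))).foldl
      (fun acc i => max acc (PySem.List.pyGetD (a :: t) i []).sum) a.sum
      = (t.map List.sum).foldl max a.sum := by
    have : (t.map List.sum).foldl max a.sum
        = (((PySem.List.pyRange 1 (PySem.List.len (a :: t))).map
            (fun j => PySem.List.pyGetD (a :: t) j [])).map List.sum).foldl max a.sum := by
      rw [hgtail]
    rw [this, List.map_map, List.foldl_map]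
    rfl
  set M := List.foldl max a.sum (List.map List.sum t) with hM
  have hmaxA : (PySem.List.pyRange 1 (PySem.List.len (a :: t))).foldl
      (fun acc i => if acc < (PySem.List.pyGetD (a :: t) i []).sum
        then (PySem.List.pyGetD (a :: t) i []).sum else acc) a.sum = M := by
    rw [pv_foldl_if_max, hmaxfold]
  -- B's single pass
  rw [pv_single_pass (fun i => (PySem.List.pyGetD (a :: t) i []).sum)
      (PySem.List.pyRange 1 (PySem.List.len (a :: t))) a.sum M
      ([0] : List Int) (by rw [hmaxfold])]
  dsimp only
  rw [hmaxA, pv_foldl_append2_if]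
  simp only [List.nil_append]
  have hlen2 : PySem.List.len (a :: t) = ((t.length + 1 : Nat) : Int) := by
    simp [PySem.List.len]
  -- identify A's index list (over range (t.length+1)) with B's (seed 0 plus the pass indices)
  have hsumM : a.sum ≤ M := by
    rw [hM]; exact pv_le_foldl_maxg (fun x => x) (t.map List.sum) a.sum
  -- A's index filter over the full range = B's seed-plus-pass index list
  have htailf : List.filter (fun i => M == (PySem.List.pyGetD (a :: t) i []).sum)
      (PySem.List.pyRange 1 (PySem.List.len (a :: t)))
      = List.filter (fun i => (PySem.List.pyGetD (a :: t) i []).sum == M)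
          (PySem.List.pyRange 1 (PySem.List.len (a :: t))) :=
    List.filter_congr (fun i _ => pv_beq_comm _ _)
  have hAidx : List.filter (fun i => M == (PySem.List.pyGetD (a :: t) i []).sum)
      (PySem.List.pyRange 0 (PySem.List.len (a :: t)))
      = (if a.sum < M then [] else [0]) ++
        List.filter (fun i => (PySem.List.pyGetD (a :: t) i []).sum == M)
          (PySem.List.pyRange 1 (PySem.List.len (a :: t))) := by
    rw [hsplit, List.filter_cons, htailf]
    by_cases hc : a.sum < M
    · rw [if_neg (by simp [hg0]; omega), if_pos hc, List.nil_append]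
    · rw [if_pos (by simp [hg0]; omega), if_neg hc]
      simp
  rw [hAidx]
  set L := (if a.sum < M then ([] : List Int) else [0]) ++
      List.filter (fun i => (PySem.List.pyGetD (a :: t) i []).sum == M)
        (PySem.List.pyRange 1 (PySem.List.len (a :: t))) with hL
  set pieces := L.map PySem.Int.toChars with hpieces
  have hmapflat : L.map (fun i => PySem.Int.toChars i ++ [',', ' '])
      = pieces.map (· ++ [',', ' ']) := by
    rw [hpieces, List.map_map]
    rfl
  rw [hmapflat]
  -- the index list is nonempty: either 0 survives, or the maximum is attained in the tail
  have hLne : L ≠ [] := by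
    rw [hL]
    by_cases hc : a.sum < M
    · rw [if_pos hc, List.nil_append]
      have hMt : M ∈ t.map List.sum := by
        rcases PySem.List.foldl_max_mem (t.map List.sum) a.sum with h | h
        · rw [hM] at hc; omega
        · exact h
      obtain ⟨k, hklt, hk⟩ := List.mem_iff_getElem.mp hMt
      have hklt' : k < t.length := by simpa using hklt
      have hmem : (((k + 1 : Nat) : Int)) ∈ PySem.List.pyRange 1 (PySem.List.len (a :: t)) := by
        rw [PySem.List.mem_pyRange_one, hlen2]
        constructor
        · exact_mod_cast Nat.succ_le_succ (Nat.zero_le k)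
        · exact_mod_cast Nat.succ_lt_succ hklt'
      have hval : (PySem.List.pyGetD (a :: t) ((k + 1 : Nat) : Int) []).sum = M := by
        rw [PySem.List.pyGetD_natCast]
        have : (a :: t).getD (k + 1) [] = t[k] := by
          simp only [List.getD_cons_succ]
          exact List.getD_eq_getElem t [] hklt'
        rw [this]
        simpa using hk
      exact List.ne_nil_of_mem (List.mem_filter.mpr ⟨hmem, beq_iff_eq.mpr hval⟩)
    · rw [if_neg hc]
      simp
  have hpne : pieces ≠ [] := by simp [hpieces, hLne]
  have hpform : ∀ q ∈ pieces, ∃ i : Int, q = PySem.Int.toChars i := by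
    intro q hq
    obtain ⟨i, _, rfl⟩ := List.mem_map.mp hq
    exact ⟨i, rfl⟩
  rw [pv_flatten_eq_intercalate _ pieces hpne]
  refine congrArg String.mk ?_
  show PySem.Chars.stripChars (List.intercalate [',', ' '] pieces ++ [',', ' ']) [',', ' ']
      = List.intercalate [',', ' '] pieces
  apply pv_stripChars_append
  · intro c hc
    fin_cases hc <;> rfl
  · -- the first character is a digit of the first piece
    obtain ⟨q, qs, hq⟩ := List.exists_cons_of_ne_nil hpne
    obtain ⟨i, hqi⟩ := hpform q (hq ▸ List.mem_cons_self ..)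
    have hqne : q ≠ [] := by rw [hqi]; exact pv_toChars_ne i
    obtain ⟨c, t0, hct⟩ := List.exists_cons_of_ne_nil hqne
    obtain ⟨t', ht'⟩ := pv_intercalate_head [',', ' '] q qs c t0 hct
    refine ⟨c, t', by rw [hq, ht'], ?_⟩
    have hcq : c ∈ q := hct ▸ List.mem_cons_self ..
    rw [hqi] at hcq
    exact pv_toChars_ok i c hcq
  · -- the last character is a digit of the last piece
    rw [pv_reverse_intercalate]
    have hrne : pieces.reverse ≠ [] := fun h => hpne (List.reverse_eq_nil_iff.mp h)
    obtain ⟨q', qs', hr⟩ := List.exists_cons_of_ne_nil hrne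
    have hq'mem : q' ∈ pieces := List.mem_reverse.mp (hr ▸ List.mem_cons_self ..)
    obtain ⟨i, hqi⟩ := hpform q' hq'mem
    have hqrne : q'.reverse ≠ [] := by
      intro h
      exact pv_toChars_ne i (by rw [← hqi]; exact List.reverse_eq_nil_iff.mp h)
    obtain ⟨c', t', hqr⟩ := List.exists_cons_of_ne_nil hqrne
    obtain ⟨t'', ht''⟩ := pv_intercalate_head ([',', ' '] : List Char).reverse q'.reverse
      (List.map List.reverse qs') c' t' hqr
    refine ⟨c', t'', ?_, ?_⟩
    · rw [← List.map_reverse, hr, List.map_cons, ht'']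
    · have hcq : c' ∈ q'.reverse := hqr ▸ List.mem_cons_self ..
      rw [List.mem_reverse, hqi] at hcq
      exact pv_toChars_ok i c' hcq
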